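-- pv_equiv track=rewrite | github.com/MYL23/MASO-MSF | MASO structure/ComputeAttributes.py | splitPixelsPts
-- ===== SOURCE A (Python) =====
-- def statistics(data):
--     tempCon = data[0][4]
--     statis = 1
--     for q in range(len(data)):
--         if data[q][4] != tempCon:
--             statis += 1
--             tempCon = data[q][4]
--     return statis
--
-- def splitPixelsPts(pts):
--     splitlen = statistics(pts)
--     splitPts = [[] for p in range(splitlen)]
--     mark = pts[0][4]
--     splitIndex = 0
--     for m in range(len(pts)):
--         if mark == pts[m][4]:
--             splitPts[splitIndex].append(pts[m])
--         else:
--             splitIndex += 1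
--             mark = pts[m][4]
--             splitPts[splitIndex].append(pts[m])
--     return splitPts
-- ===== SOURCE B (Python) =====
-- def splitPixelsPts(pts):
--     out = []
--     cur = []
--     for p in pts:
--         if cur and cur[-1][4] == p[4]:
--             cur.append(p)
--         else:
--             if cur:
--                 out.append(cur)
--             cur = [p]
--     if cur:
--         out.append(cur)
--     return out
-- ===== Notes on version B (the rewrite author's own statement) =====
-- stated objective: simpler
-- what changed: A makes two passes (a helper counts the runs, then preallocates that many empty sublists and fills them by maintaining a mark and a running split index); B makes one forward pass that accumulates the current run in a list and flushes it to the output whenever the marker pts[i][4] changes, with no counting, preallocation or index bookkeeping.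
import Mathlib
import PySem

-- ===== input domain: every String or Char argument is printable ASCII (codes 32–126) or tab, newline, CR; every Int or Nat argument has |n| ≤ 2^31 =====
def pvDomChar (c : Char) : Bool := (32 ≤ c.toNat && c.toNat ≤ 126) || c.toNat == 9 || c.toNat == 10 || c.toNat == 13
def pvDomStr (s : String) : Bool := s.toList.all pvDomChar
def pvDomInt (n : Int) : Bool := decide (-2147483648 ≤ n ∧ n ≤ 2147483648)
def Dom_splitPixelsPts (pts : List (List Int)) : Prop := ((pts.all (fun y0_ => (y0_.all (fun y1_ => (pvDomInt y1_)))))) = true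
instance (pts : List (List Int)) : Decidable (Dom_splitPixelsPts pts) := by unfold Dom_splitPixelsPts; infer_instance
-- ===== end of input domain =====

-- B replaces A's two passes (count the runs, preallocate, fill by index) by a single forward
-- pass accumulating the current run and flushing it at each marker change; equal return value
-- on Pre_ (nonempty input, rows of length ≥ 5); objective: simpler, no speed claim.

-- ===== PORT A =====

-- pts[i][4] with default (Pre_ keeps the index in range, where pyGetD = Python indexing)
def pvGet4 (r : List Int) : Int := PySem.List.pyGetD r 4 0

-- one iteration of statistics' loop body, applied to data[q]
def pvStatStep (s : Int × Int) (r : List Int) : Int × Int :=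
  if pvGet4 r ≠ s.1 then (pvGet4 r, s.2 + 1) else s

def pvStatistics (data : List (List Int)) : Int :=
  let tempCon := pvGet4 (PySem.List.pyGetD data 0 [])
  let fin := (PySem.List.pyRange 0 (data.length : Int) 1).foldl
    (fun s q => pvStatStep s (PySem.List.pyGetD data q [])) (tempCon, 1)
  fin.2

-- one iteration of splitPixelsPts' loop body, applied to pts[m]; state (splitPts, mark, splitIndex)
-- (splitIndex starts at 0 and only increments, so .toNat is exact for the Python list index)
def pvAStep (s : List (List (List Int)) × Int × Int) (r : List Int) :
    List (List (List Int)) × Int × Int :=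
  if s.2.1 = pvGet4 r then
    (s.1.modify s.2.2.toNat (· ++ [r]), s.2.1, s.2.2)
  else
    (s.1.modify (s.2.2 + 1).toNat (· ++ [r]), pvGet4 r, s.2.2 + 1)

def splitPixelsPts (pts : List (List Int)) : List (List (List Int)) :=
  let splitlen := pvStatistics pts
  let splitPts : List (List (List Int)) := (PySem.List.pyRange 0 splitlen 1).map (fun _ => [])
  let mark := pvGet4 (PySem.List.pyGetD pts 0 [])
  let fin := (PySem.List.pyRange 0 (pts.length : Int) 1).foldl
    (fun s m => pvAStep s (PySem.List.pyGetD pts m [])) (splitPts, mark, 0)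
  fin.1

-- ===== PORT B =====

-- one iteration of B's loop: extend the current run or flush it and start a new one
def pvBStep (s : List (List (List Int)) × List (List Int)) (p : List Int) :
    List (List (List Int)) × List (List Int) :=
  if s.2 ≠ [] ∧ pvGet4 (PySem.List.pyGetD s.2 (-1) []) = pvGet4 p then
    (s.1, s.2 ++ [p])
  else
    ((if s.2 ≠ [] then s.1 ++ [s.2] else s.1), [p])

def splitPixelsPts_alt (pts : List (List Int)) : List (List (List Int)) :=
  let fin := pts.foldl pvBStep ([], [])
  if fin.2 ≠ [] then fin.1 ++ [fin.2] else fin.1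

-- ===== PRECONDITION & SPEC =====
-- Pre_ excludes exactly the inputs where A raises IndexError: empty pts (pts[0]) and rows
-- shorter than 5 entries (pts[q][4]); A returns on every other input.
def Pre_splitPixelsPts (pts : List (List Int)) : Prop :=
  pts ≠ [] ∧ ∀ r ∈ pts, 5 ≤ r.length
instance (pts : List (List Int)) : Decidable (Pre_splitPixelsPts pts) := by
  unfold Pre_splitPixelsPts; infer_instance

def pvWitness_splitPixelsPts : List (List Int) := [[1, 2, 3, 4, 7], [0, 0, 0, 0, 7], [0, 0, 0, 0, 9]]

def Spec_splitPixelsPts (pts : List (List Int)) (out : List (List (List Int))) : Prop := out = splitPixelsPts_alt pts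
instance (pts : List (List Int)) (out : List (List (List Int))) : Decidable (Spec_splitPixelsPts pts out) := by unfold Spec_splitPixelsPts; infer_instance

-- ===== CLAIM (what is proved, stated in full; the proofs are below) =====
def Claim_equal_splitPixelsPts : Prop := ∀ (pts : List (List Int)), Dom_splitPixelsPts pts → Pre_splitPixelsPts pts → Spec_splitPixelsPts pts (splitPixelsPts pts)

-- ===== LEMMAS AND PROOFS =====

-- number of marker changes in l, starting from current marker c
def pvChanges (c : Int) : List (List Int) → Nat
  | [] => 0
  | r :: t => if pvGet4 r ≠ c then 1 + pvChanges (pvGet4 r) t else pvChanges c t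

lemma pvStat_fold (l : List (List Int)) : ∀ (c k : Int),
    (l.foldl pvStatStep (c, k)).2 = k + (pvChanges c l : Int) := by
  induction l with
  | nil => intro c k; simp [pvChanges]
  | cons r t ih =>
    intro c k
    simp only [List.foldl_cons, pvStatStep, pvChanges]
    by_cases h : pvGet4 r = c
    · simp [h, ih]
    · simp only [h, ne_eq, not_false_eq_true, if_pos, ih]
      omega

lemma pvModify_append_cons {α : Type} (done : List α) (x : α) (rest : List α) (f : α → α) :
    (done ++ x :: rest).modify done.length f = done ++ f x :: rest := by
  induction done with
  | nil => rfl
  | cons d t ih =>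
    show d :: ((t ++ x :: rest).modify t.length f) = d :: (t ++ f x :: rest)
    rw [ih]

lemma pvModify_len_add {α : Type} (done : List α) (x y : α) (rest : List α) (f : α → α) :
    (done ++ x :: y :: rest).modify (done.length + 1) f = done ++ x :: f y :: rest := by
  have h := pvModify_append_cons (done ++ [x]) y rest f
  simpa using h

lemma pvGetD_neg_one_append (xs : List (List Int)) (x : List Int) :
    PySem.List.pyGetD (xs ++ [x]) (-1) [] = x := by
  simp [PySem.List.pyGetD, PySem.List.pyGet?, PySem.List.pyIdx?]

lemma pvMain (l : List (List Int)) : ∀ (done : List (List (List Int))) (cur : List (List Int)) (c : Int),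
    cur ≠ [] → pvGet4 (PySem.List.pyGetD cur (-1) []) = c →
    (l.foldl pvAStep (done ++ cur :: List.replicate (pvChanges c l) [], c, (done.length : Int))).1
      = (let fin := l.foldl pvBStep (done, cur);
         if fin.2 ≠ [] then fin.1 ++ [fin.2] else fin.1) := by
  induction l with
  | nil => intro done cur c hcur _; simp [pvChanges, hcur]
  | cons r t ih =>
    intro done cur c hcur hlast
    by_cases h : pvGet4 r = c
    · have hch : pvChanges c (r :: t) = pvChanges c t := by simp [pvChanges, h]
      have hA : pvAStep (done ++ cur :: List.replicate (pvChanges c t) [], c, (done.length : Int)) r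
          = (done ++ (cur ++ [r]) :: List.replicate (pvChanges c t) [], c, (done.length : Int)) := by
        simp only [pvAStep, if_pos h.symm, Int.toNat_natCast]
        rw [pvModify_append_cons]
      have hB : pvBStep (done, cur) r = (done, cur ++ [r]) := by
        simp [pvBStep, hcur, hlast, h]
      simp only [List.foldl_cons, hch, hA, hB]
      exact ih done (cur ++ [r]) c (by simp) (by rw [pvGetD_neg_one_append]; exact h)
    · have hch : pvChanges c (r :: t) = 1 + pvChanges (pvGet4 r) t := by simp [pvChanges, h]
      have hrep : List.replicate (1 + pvChanges (pvGet4 r) t) ([] : List (List Int))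
          = [] :: List.replicate (pvChanges (pvGet4 r) t) [] := by
        rw [Nat.add_comm, List.replicate_succ]
      have hA : pvAStep (done ++ cur :: [] :: List.replicate (pvChanges (pvGet4 r) t) [], c, (done.length : Int)) r
          = (done ++ cur :: [r] :: List.replicate (pvChanges (pvGet4 r) t) [], pvGet4 r, (done.length : Int) + 1) := by
        simp only [pvAStep]
        rw [if_neg (fun hc => h hc.symm)]
        have h1 : ((done.length : Int) + 1).toNat = done.length + 1 := by omega
        rw [h1, pvModify_len_add]
        simp
      have hB : pvBStep (done, cur) r = (done ++ [cur], [r]) := by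
        have hno : ¬ (cur ≠ [] ∧ pvGet4 (PySem.List.pyGetD cur (-1) []) = pvGet4 r) := by
          rintro ⟨-, hc⟩; exact h (by rw [← hc, hlast])
        simp only [pvBStep]
        rw [if_neg hno]
        simp [hcur]
      have e1 : done ++ cur :: [r] :: List.replicate (pvChanges (pvGet4 r) t) []
          = (done ++ [cur]) ++ [r] :: List.replicate (pvChanges (pvGet4 r) t) ([] : List (List Int)) := by
        simp
      have e2 : (done.length : Int) + 1 = (((done ++ [cur]).length : Nat) : Int) := by
        simp
      simp only [List.foldl_cons, hch, hrep, hA, hB, e1, e2]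
      exact ih (done ++ [cur]) [r] (pvGet4 r) (by simp)
        (by simpa using congrArg pvGet4 (pvGetD_neg_one_append [] r))
theorem splitPixelsPts_spec : Claim_equal_splitPixelsPts := by
  intro pts _ hpre
  obtain ⟨hne, -⟩ := hpre
  unfold Spec_splitPixelsPts splitPixelsPts splitPixelsPts_alt
  dsimp only
  cases pts with
  | nil => exact absurd rfl hne
  | cons p rest =>
    rw [PySem.List.foldl_pyRange_zero_pyGetD' (p :: rest) [] pvAStep]
    have hp0 : PySem.List.pyGetD (p :: rest) 0 [] = p := by simp [pysem]
    have hstat : pvStatistics (p :: rest) = 1 + (pvChanges (pvGet4 p) rest : Int) := by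
      unfold pvStatistics
      dsimp only
      rw [PySem.List.foldl_pyRange_zero_pyGetD' (p :: rest) [] pvStatStep]
      simp only [hp0, List.foldl_cons]
      have : pvStatStep (pvGet4 p, 1) p = (pvGet4 p, 1) := by simp [pvStatStep]
      rw [this, pvStat_fold]
    have hsplit : (PySem.List.pyRange 0 (pvStatistics (p :: rest)) 1).map
          (fun _ => ([] : List (List Int)))
        = [] :: List.replicate (pvChanges (pvGet4 p) rest) [] := by
      rw [hstat, List.map_const']
      rw [PySem.List.length_pyRange_one]
      have : ((1 + (pvChanges (pvGet4 p) rest : Int)) - 0).toNat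
          = pvChanges (pvGet4 p) rest + 1 := by omega
      rw [this, List.replicate_succ]
    rw [hsplit, hp0]
    simp only [List.foldl_cons]
    have hfirst : pvAStep ([] :: List.replicate (pvChanges (pvGet4 p) rest) [], pvGet4 p, 0) p
        = ([p] :: List.replicate (pvChanges (pvGet4 p) rest) [], pvGet4 p, 0) := by
      simp only [pvAStep]
      simp
    have hBfirst : pvBStep ([], []) p = ([], [p]) := by simp [pvBStep]
    rw [hfirst, hBfirst]
    have := pvMain rest [] [p] (pvGet4 p) (by simp)
      (by simpa using congrArg pvGet4 (pvGetD_neg_one_append [] p))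
    simpa using this
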